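-- pv_equiv track=rewrite | github.com/JackDragon/lc_practice | group_anagrams.py | groupReverse
-- ===== SOURCE A (Python) =====
-- def groupReverse(strs):
--     """
--     :type strs: List[str]
--     :rtype: List[List[str]]
--     """
--     ret_list = []
--     index = {}
--     for s in strs:
--         if s in index:
--             ret_list[index[s]].append(s)
--         else:
--             index[s], index[s[::-1]] = len(ret_list), len(ret_list)
--             ret_list.append([s])
--     return ret_list
-- ===== SOURCE B (Python) =====
-- def groupReverse(strs):
--     """
--     :type strs: List[str]
--     :rtype: List[List[str]]
--     """
--     # Pass 1: collect the distinct canonical representatives in first-seen order.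
--     keys = []
--     for s in strs:
--         k = min(s, s[::-1])
--         if k not in keys:
--             keys.append(k)
--     # Pass 2: one filter over the whole input per representative.
--     return [[s for s in strs if min(s, s[::-1]) == k] for k in keys]
-- ===== Notes on version B (the rewrite author's own statement) =====
-- stated objective: alternative
-- what changed: B replaces A's single-pass dual-key index dict that mutates a growing list of groups by two staged passes with no dict at all: first dedup the canonical keys min(s, s[::-1]) in first-seen order, then build each group by filtering the whole input per key.
import Mathlib
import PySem

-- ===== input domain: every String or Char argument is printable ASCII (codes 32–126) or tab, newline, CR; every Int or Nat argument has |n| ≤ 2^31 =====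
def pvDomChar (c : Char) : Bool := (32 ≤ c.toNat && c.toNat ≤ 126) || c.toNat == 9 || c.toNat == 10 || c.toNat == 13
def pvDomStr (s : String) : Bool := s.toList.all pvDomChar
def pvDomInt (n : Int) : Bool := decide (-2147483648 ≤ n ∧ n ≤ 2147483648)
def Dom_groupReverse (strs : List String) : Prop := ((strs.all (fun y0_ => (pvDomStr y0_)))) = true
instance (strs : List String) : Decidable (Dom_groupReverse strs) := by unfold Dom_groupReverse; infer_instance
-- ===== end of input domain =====

-- B drops A's dual-key index dict and its in-place group mutation entirely: it runs
-- two staged passes — dedup the canonical keys min(s, s[::-1]) in first-seen order,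
-- then filter the whole input once per key (objective: alternative, dict-free).

-- ===== PORT A =====
-- s[::-1]
def pyRev (s : String) : String := (PySem.Str.slice? s none none (-1)).getD ""

-- one iteration of A's loop over (ret_list, index)
def groupReverseStep (st : List (List String) × PySem.Dict String Nat) (s : String) :
    List (List String) × PySem.Dict String Nat :=
  match st.2.get? s with
  | some i => (st.1.set i (st.1.getD i [] ++ [s]), st.2)
  | none => (st.1 ++ [[s]], (st.2.insert s st.1.length).insert (pyRev s) st.1.length)

def groupReverse (strs : List String) : List (List String) :=
  (strs.foldl groupReverseStep ([], PySem.Dict.empty)).1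

-- ===== PORT B =====
-- k = min(s, s[::-1])
def canonKey (s : String) : String :=
  if pyRev s < s then pyRev s else s

-- pass 1: 'if k not in keys: keys.append(k)'
def canonKeys (strs : List String) : List String :=
  strs.foldl (fun ks s => if canonKey s ∈ ks then ks else ks ++ [canonKey s]) []

-- pass 2: '[[s for s in strs if min(s, s[::-1]) == k] for k in keys]'
def groupReverse_alt (strs : List String) : List (List String) :=
  (canonKeys strs).map (fun k => strs.filter (fun s => canonKey s == k))

-- ===== PRECONDITION & SPEC =====
def Spec_groupReverse (strs : List String) (out : List (List String)) : Prop := out = groupReverse_alt strs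
instance (strs : List String) (out : List (List String)) : Decidable (Spec_groupReverse strs out) := by unfold Spec_groupReverse; infer_instance

-- ===== CLAIM (what is proved, stated in full; the proofs are below) =====
def Claim_equal_groupReverse : Prop := ∀ (strs : List String), Dom_groupReverse strs → Spec_groupReverse strs (groupReverse strs)

-- ===== LEMMAS AND PROOFS =====

theorem pyRev_def (s : String) : pyRev s = String.ofList s.toList.reverse := by
  simp [pyRev, PySem.Str.slice?_none_none_neg_one]

theorem pyRev_pyRev (s : String) : pyRev (pyRev s) = s := by
  simp [pyRev_def, String.toList_ofList]

theorem pyRev_inj {s t : String} (h : pyRev s = pyRev t) : s = t := by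
  have := congrArg pyRev h
  rwa [pyRev_pyRev, pyRev_pyRev] at this

theorem canonKey_pyRev (s : String) : canonKey (pyRev s) = canonKey s := by
  simp only [canonKey, pyRev_pyRev]
  split_ifs with h1 h2 h2
  · exact absurd h2 (lt_asymm h1)
  · rfl
  · rfl
  · exact le_antisymm (not_lt.mp h1) (not_lt.mp h2)

theorem canonKey_cases (s : String) : canonKey s = s ∨ canonKey s = pyRev s := by
  unfold canonKey; split_ifs <;> simp

theorem canonKey_eq_iff (t s : String) : canonKey t = canonKey s ↔ t = s ∨ t = pyRev s := by
  constructor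
  · intro h
    rcases canonKey_cases t with ht | ht <;> rcases canonKey_cases s with hs | hs <;>
      rw [ht, hs] at h
    · exact Or.inl h
    · exact Or.inr h
    · right; rw [← h, pyRev_pyRev]
    · exact Or.inl (pyRev_inj h)
  · rintro (rfl | rfl)
    · rfl
    · exact canonKey_pyRev s

theorem mem_canonKeys_foldl (p : List String) (acc : List String) (k : String) :
    k ∈ p.foldl (fun ks s => if canonKey s ∈ ks then ks else ks ++ [canonKey s]) acc ↔
      k ∈ acc ∨ ∃ s ∈ p, canonKey s = k := by
  induction p generalizing acc with
  | nil => simp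
  | cons a tl ih =>
    simp only [List.foldl_cons, ih, List.exists_mem_cons_iff]
    split_ifs with h
    · have hak : canonKey a = k → k ∈ acc := fun he => he ▸ h
      tauto
    · simp only [List.mem_append, List.mem_singleton]
      constructor
      · rintro ((hk | rfl) | hk)
        · exact Or.inl hk
        · exact Or.inr (Or.inl rfl)
        · exact Or.inr (Or.inr hk)
      · rintro (hk | hk | hk)
        · exact Or.inl (Or.inl hk)
        · exact Or.inl (Or.inr hk.symm)
        · exact Or.inr hk

theorem mem_canonKeys (p : List String) (k : String) :
    k ∈ canonKeys p ↔ ∃ s ∈ p, canonKey s = k := by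
  rw [canonKeys, mem_canonKeys_foldl]; simp

theorem nodup_canonKeys_foldl (p : List String) (acc : List String) (h : acc.Nodup) :
    (p.foldl (fun ks s => if canonKey s ∈ ks then ks else ks ++ [canonKey s]) acc).Nodup := by
  induction p generalizing acc with
  | nil => exact h
  | cons a tl ih =>
    simp only [List.foldl_cons]
    split_ifs with hmem
    · exact ih _ h
    · refine ih _ ?_
      rw [List.nodup_append]
      refine ⟨h, List.nodup_singleton _, ?_⟩
      intro x hx y hy
      simp only [List.mem_singleton] at hy
      exact fun he => hmem ((he.trans hy) ▸ hx)

theorem nodup_canonKeys (p : List String) : (canonKeys p).Nodup :=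
  nodup_canonKeys_foldl p [] List.nodup_nil

theorem canonKeys_append_singleton (p : List String) (s : String) :
    canonKeys (p ++ [s]) =
      if canonKey s ∈ canonKeys p then canonKeys p else canonKeys p ++ [canonKey s] := by
  simp [canonKeys, List.foldl_append]

-- idxOf? facts for the append step
theorem idxOf?_append_self {l : List String} {a : String} (h : a ∉ l) :
    List.idxOf? a (l ++ [a]) = some l.length := by
  rw [List.idxOf?_eq_some_iff]
  refine ⟨by simp, by simp, ?_⟩
  intro j hj
  rw [List.getElem_append_left (by simpa using hj)]
  intro hja
  exact h (hja ▸ List.getElem_mem _)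

theorem idxOf?_append_of_ne {l : List String} {a b : String} (h : b ≠ a) :
    List.idxOf? b (l ++ [a]) = List.idxOf? b l := by
  cases hb : List.idxOf? b l with
  | none =>
    rw [List.idxOf?_eq_none_iff] at hb ⊢
    simp [hb, h]
  | some i =>
    rw [List.idxOf?_eq_some_iff] at hb
    obtain ⟨hi, hbi, hmin⟩ := hb
    rw [List.idxOf?_eq_some_iff]
    refine ⟨by simp; omega, ?_, ?_⟩
    · rwa [List.getElem_append_left hi]
    · intro j hj
      rw [List.getElem_append_left (by omega)]
      exact hmin j hj

theorem idxOf?_getElem {l : List String} {a : String} {i : ℕ} (h : List.idxOf? a l = some i) :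
    ∃ hi : i < l.length, l[i] = a := by
  rw [List.idxOf?_eq_some_iff] at h
  exact ⟨h.1, h.2.1⟩

-- the found case: setting position i of the mapped list appends s to exactly the group of k0
theorem map_append_ite_eq_set (ks : List String) (f : String → List String) (k0 s : String)
    (i : ℕ) (hnd : ks.Nodup) (h : List.idxOf? k0 ks = some i) :
    ks.map (fun k => f k ++ if k0 == k then [s] else []) =
      (ks.map f).set i ((ks.map f).getD i [] ++ [s]) := by
  induction ks generalizing i with
  | nil => simp at h
  | cons a tl ih =>
    obtain ⟨hi, hget⟩ := idxOf?_getElem h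
    cases i with
    | zero =>
      simp only [List.getElem_cons_zero] at hget
      subst hget
      have htl : a ∉ tl := (List.nodup_cons.mp hnd).1
      simp only [List.map_cons, List.set_cons_zero, List.getD_cons_zero, BEq.rfl, if_pos]
      congr 1
      exact List.map_congr_left fun k hk => by
        have : a ≠ k := fun hak => htl (hak ▸ hk)
        simp [this]
    | succ j =>
      have ha : k0 ≠ a := by
        rw [List.idxOf?_eq_some_iff] at h
        intro hk0
        exact (h.2.2 0 (Nat.succ_pos j)) (by simpa using hk0.symm)
      have htl : List.idxOf? k0 tl = some j := by
        rw [List.idxOf?_eq_some_iff] at h ⊢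
        obtain ⟨h1, h2, h3⟩ := h
        refine ⟨by simpa using h1, by simpa using h2, ?_⟩
        intro m hm
        have := h3 (m + 1) (by omega)
        simpa using this
      simp only [List.map_cons, List.set_cons_succ, List.getD_cons_succ]
      congr 1
      · have : (k0 == a) = false := by simpa using ha
        simp [this]
      · exact ih j (List.nodup_cons.mp hnd).2 htl

-- A's loop invariant: the state is exactly B's staged result on the prefix processed so far
def InvA (p : List String) (st : List (List String) × PySem.Dict String Nat) : Prop :=
  st.1 = groupReverse_alt p ∧ ∀ t, st.2.get? t = List.idxOf? (canonKey t) (canonKeys p)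

theorem invA_step (p : List String) (s : String) (st : List (List String) × PySem.Dict String Nat)
    (h : InvA p st) : InvA (p ++ [s]) (groupReverseStep st s) := by
  obtain ⟨h1, h2⟩ := h
  unfold groupReverseStep
  cases hidx : st.2.get? s with
  | some i =>
    -- s (hence its key) was seen: canonKeys unchanged, group i gets s appended
    have hkey : List.idxOf? (canonKey s) (canonKeys p) = some i := by rw [← h2, hidx]
    have hmem : canonKey s ∈ canonKeys p := by
      obtain ⟨hi, hget⟩ := idxOf?_getElem hkey
      exact hget ▸ List.getElem_mem _
    have hks : canonKeys (p ++ [s]) = canonKeys p := by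
      rw [canonKeys_append_singleton, if_pos hmem]
    constructor
    · simp only [h1, groupReverse_alt, hks]
      have hrhs : List.map (fun k => List.filter (fun s' => canonKey s' == k) (p ++ [s])) (canonKeys p)
          = List.map (fun k => List.filter (fun s' => canonKey s' == k) p
              ++ if canonKey s == k then [s] else []) (canonKeys p) := by
        apply List.map_congr_left
        intro k _
        rw [List.filter_append, List.filter_singleton, Bool.cond_eq_ite]
      rw [hrhs, map_append_ite_eq_set (canonKeys p) _ (canonKey s) s i (nodup_canonKeys p) hkey]
    · intro t
      rw [h2 t, hks]
  | none =>
    -- new key: it is appended, a fresh singleton group is created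
    have hkey : List.idxOf? (canonKey s) (canonKeys p) = none := by rw [← h2, hidx]
    have hnmem : canonKey s ∉ canonKeys p := List.idxOf?_eq_none_iff.mp hkey
    have hks : canonKeys (p ++ [s]) = canonKeys p ++ [canonKey s] := by
      rw [canonKeys_append_singleton, if_neg hnmem]
    have hlen : st.1.length = (canonKeys p).length := by rw [h1, groupReverse_alt, List.length_map]
    constructor
    · simp only [h1, groupReverse_alt, hks, List.map_append, List.map_cons, List.map_nil]
      congr 1
      · apply List.map_congr_left
        intro k hk
        rw [List.filter_append]
        have : canonKey s ≠ k := fun hc => hnmem (hc ▸ hk)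
        simp [this]
      · have hfil : p.filter (fun s' => canonKey s' == canonKey s) = [] := by
          rw [List.filter_eq_nil_iff]
          intro s' hs' hc
          exact hnmem ((mem_canonKeys p (canonKey s)).mpr ⟨s', hs', by simpa using hc⟩)
        simp [List.filter_append, hfil]
    · intro t
      rw [hks]
      by_cases hc : canonKey t = canonKey s
      · rcases (canonKey_eq_iff t s).mp hc with rfl | rfl
        · rw [hc, idxOf?_append_self hnmem, ← hlen]
          by_cases hrs : pyRev t = t
          · rw [PySem.Dict.get?_insert, if_pos hrs.symm]
          · rw [PySem.Dict.get?_insert, if_neg (fun h => hrs h.symm),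
              PySem.Dict.get?_insert, if_pos rfl]
        · rw [hc, idxOf?_append_self hnmem, ← hlen, PySem.Dict.get?_insert, if_pos rfl]
      · have hts : t ≠ s := fun h => hc (h ▸ rfl)
        have htr : t ≠ pyRev s := fun h => hc (by rw [h, canonKey_pyRev])
        rw [idxOf?_append_of_ne hc, ← h2 t,
          PySem.Dict.get?_insert, if_neg htr, PySem.Dict.get?_insert, if_neg hts]

theorem invA_foldl (rest p : List String) (st : List (List String) × PySem.Dict String Nat)
    (h : InvA p st) : InvA (p ++ rest) (rest.foldl groupReverseStep st) := by
  induction rest generalizing p st with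
  | nil => simpa using h
  | cons a tl ih =>
    have := ih (p ++ [a]) (groupReverseStep st a) (invA_step p a st h)
    simpa using this

-- ===== VERDICT (by name: the statement is the Claim_ definition above) =====
theorem groupReverse_spec : Claim_equal_groupReverse := by
  intro strs _
  unfold Spec_groupReverse
  have h0 : InvA [] (([], PySem.Dict.empty) : List (List String) × PySem.Dict String Nat) := by
    constructor
    · simp [groupReverse_alt, canonKeys]
    · intro t; simp [canonKeys, PySem.Dict.get?_empty]
  have := invA_foldl strs [] _ h0
  rw [groupReverse, this.1]
  simp
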